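-- pv_equiv track=rewrite | github.com/opengauss-mirror/openGauss-DBMind | dbmind/common/utils/checking.py | check_path_valid
-- ===== SOURCE A (Python) =====
-- def check_path_valid(path):
--     char_black_list = (" ", "|", ";", "&", "$", "<", ">", "`", "\\",
--                        "'", "\"", "{", "}", "(", ")", "[", "]", "~",
--                        "*", "?", "!", "\n")
--
--     if path.strip() == '':
--         return True
--
--     for char in char_black_list:
--         if path.find(char) >= 0:
--             return False
--
--     return True
-- ===== SOURCE B (Python) =====
-- def check_path_valid(path):
--     char_black_list = {" ", "|", ";", "&", "$", "<", ">", "`", "\\",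
--                        "'", "\"", "{", "}", "(", ")", "[", "]", "~",
--                        "*", "?", "!", "\n"}
--
--     if path.strip() == '':
--         return True
--
--     return all(c not in char_black_list for c in path)
-- ===== Notes on version B (the rewrite author's own statement) =====
-- stated objective: idiomatic
-- what changed: B makes one pass over the path's characters testing set membership instead of A's loop over the blacklist with a full-string find scan per blacklisted character.
import Mathlib
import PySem

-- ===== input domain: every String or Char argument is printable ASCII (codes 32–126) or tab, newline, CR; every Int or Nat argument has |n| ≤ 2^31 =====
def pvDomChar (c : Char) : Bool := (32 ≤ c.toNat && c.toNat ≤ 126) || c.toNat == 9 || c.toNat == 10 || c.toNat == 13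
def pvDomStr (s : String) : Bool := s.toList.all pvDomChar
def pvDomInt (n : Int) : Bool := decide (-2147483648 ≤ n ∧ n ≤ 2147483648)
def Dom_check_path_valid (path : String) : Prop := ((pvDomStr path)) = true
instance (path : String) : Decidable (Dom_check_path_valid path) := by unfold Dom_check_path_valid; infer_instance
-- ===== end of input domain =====

-- B scans the path once testing blacklist-set membership instead of A's one find-scan per blacklisted character (idiomatic).

-- ===== PORT A =====
def pvBlackA : List String :=
  [" ", "|", ";", "&", "$", "<", ">", "`", "\\", "'", "\"", "{", "}", "(", ")", "[", "]", "~", "*", "?", "!", "\n"]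

def pvLoopA (path : String) : List String → Bool
  | [] => true
  | c :: cs => if 0 ≤ PySem.Str.find path c then false else pvLoopA path cs

def check_path_valid (path : String) : Bool :=
  if PySem.Str.strip path == "" then true
  else pvLoopA path pvBlackA

-- ===== PORT B =====
def pvBlackB : PySem.Set Char :=
  PySem.Set.ofList [' ', '|', ';', '&', '$', '<', '>', '`', '\\', '\'', '"', '{', '}', '(', ')', '[', ']', '~', '*', '?', '!', '\n']

def check_path_valid_alt (path : String) : Bool :=
  if PySem.Str.strip path == "" then true
  else path.toList.all (fun c => !(PySem.Set.contains pvBlackB c))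

-- ===== PRECONDITION & SPEC =====
def Spec_check_path_valid (path : String) (out : Bool) : Prop := out = check_path_valid_alt path
instance (path : String) (out : Bool) : Decidable (Spec_check_path_valid path out) := by unfold Spec_check_path_valid; infer_instance

-- ===== CLAIM (what is proved, stated in full; the proofs are below) =====
def Claim_equal_check_path_valid : Prop := ∀ (path : String), Dom_check_path_valid path → Spec_check_path_valid path (check_path_valid path)

-- ===== LEMMAS AND PROOFS =====

theorem singleton_infix_iff_mem {α : Type} {c : α} {l : List α} : [c] <:+: l ↔ c ∈ l := by
  constructor
  · intro h
    exact h.subset (List.mem_singleton_self c)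
  · intro h
    obtain ⟨s, t, rfl⟩ := List.append_of_mem h
    exact ⟨s, t, by simp⟩

theorem loopA_eq_all (path : String) (bs : List String) :
    pvLoopA path bs = bs.all (fun b => !decide (0 ≤ PySem.Str.find path b)) := by
  induction bs with
  | nil => rfl
  | cons b bs ih =>
    rw [pvLoopA, List.all_cons, ih]
    simp only [PySem.Str.find_eq]
    by_cases h : 0 ≤ PySem.Chars.find path.toList b.toList
    · rw [if_pos h]
      simp [h]
    · rw [if_neg h]
      simp [h]

theorem disjoint_swap (xs ys : List Char) :
    xs.all (fun c => !ys.contains c) = ys.all (fun c => !xs.contains c) := by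
  rw [Bool.eq_iff_iff]
  simp only [List.all_eq_true, Bool.not_eq_true', List.contains_eq_mem, decide_eq_false_iff_not]
  exact ⟨fun h a ha hb => h a hb ha, fun h a ha hb => h a hb ha⟩

theorem find_one (path s : String) (c : Char) (hs : s.toList = [c]) :
    (!decide (0 ≤ PySem.Str.find path s)) = !path.toList.contains c := by
  rw [Bool.eq_iff_iff]
  simp only [Bool.not_eq_true', decide_eq_false_iff_not, List.contains_eq_mem]
  rw [PySem.Str.find_nonneg_iff, hs]
  exact not_congr singleton_infix_iff_mem

theorem check_path_valid_spec : Claim_equal_check_path_valid := by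
  intro path _
  unfold Spec_check_path_valid check_path_valid check_path_valid_alt
  by_cases h : PySem.Str.strip path == ""
  · simp [h]
  · simp only [h, Bool.false_eq_true, if_false]
    rw [loopA_eq_all]
    have hB : pvBlackB = [' ', '|', ';', '&', '$', '<', '>', '`', '\\', '\'', '"', '{', '}', '(', ')', '[', ']', '~', '*', '?', '!', '\n'] := by decide
    have e : ∀ (s : String) (c : Char), s.toList = [c] →
        (!decide (0 ≤ PySem.Str.find path s)) = !path.toList.contains c := find_one path
    rw [show (path.toList.all fun c => !(PySem.Set.contains pvBlackB c))
          = (path.toList.all fun c => !(List.contains [' ', '|', ';', '&', '$', '<', '>', '`', '\\', '\'', '"', '{', '}', '(', ')', '[', ']', '~', '*', '?', '!', '\n'] c)) by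
        simp [hB]]
    rw [← disjoint_swap]
    simp only [pvBlackA, List.all_cons, List.all_nil, Bool.and_true, e " " ' ' rfl, e "|" '|' rfl, e ";" ';' rfl, e "&" '&' rfl, e "$" '$' rfl, e "<" '<' rfl, e ">" '>' rfl, e "`" '`' rfl, e "\\" '\\' rfl, e "'" '\'' rfl, e "\"" '"' rfl, e "{" '{' rfl, e "}" '}' rfl, e "(" '(' rfl, e ")" ')' rfl, e "[" '[' rfl, e "]" ']' rfl, e "~" '~' rfl, e "*" '*' rfl, e "?" '?' rfl, e "!" '!' rfl, e "\n" '\n' rfl]
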